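-- pv_equiv track=rewrite | github.com/hansy-w/Term-Project | src/AFRICA.py | pickButton
-- ===== SOURCE A (Python) =====
-- def pickButton(app, mouseX, mouseY):
--     if mouseY < 600 or mouseY > 700:
--         return None
--
--     buttonWidth = 100
--     buttonSpacing = 50
--
--     for i in range(4):
--         buttonLeft = buttonSpacing + i * (buttonWidth + buttonSpacing)
--         buttonRight = buttonLeft + buttonWidth
--
--         if buttonLeft <= mouseX <= buttonRight:
--             return i
--
--     return None
-- ===== SOURCE B (Python) =====
-- def pickButton(app, mouseX, mouseY):
--     # Closed-form hit test: same return value as the 4-iteration scan.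
--     if mouseY < 600 or mouseY > 700:
--         return None
--     rel = mouseX - 50            # buttonSpacing
--     i = rel // 150               # buttonWidth + buttonSpacing
--     if rel >= 0 and i <= 3 and rel % 150 <= 100:
--         return i
--     return None
-- ===== Notes on version B (the rewrite author's own statement) =====
-- stated objective: simpler
-- what changed: Replaced the 4-iteration scan over button rectangles with a closed-form index computation (rel // 150 plus a gap test via rel % 150).
import Mathlib
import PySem

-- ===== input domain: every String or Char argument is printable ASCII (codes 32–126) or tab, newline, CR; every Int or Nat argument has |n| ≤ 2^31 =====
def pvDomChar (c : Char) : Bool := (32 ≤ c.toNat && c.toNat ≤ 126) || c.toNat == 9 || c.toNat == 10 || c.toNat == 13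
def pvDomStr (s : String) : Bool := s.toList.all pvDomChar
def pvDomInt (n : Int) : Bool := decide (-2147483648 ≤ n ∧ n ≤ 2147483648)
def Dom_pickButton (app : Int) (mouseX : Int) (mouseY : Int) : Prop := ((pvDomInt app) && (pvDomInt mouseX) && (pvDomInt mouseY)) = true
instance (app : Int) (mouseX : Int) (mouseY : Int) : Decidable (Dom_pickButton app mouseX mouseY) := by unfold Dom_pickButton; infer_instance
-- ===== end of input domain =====

-- B replaces A's four-button scan with a closed-form index computation (objective: simpler).


-- ===== PORT A =====
-- loop over range(4): first i whose button rectangle contains mouseX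
def pickButtonLoop (mouseX : Int) : List Int → Option Int
  | [] => none
  | i :: rest =>
    let buttonLeft := 50 + i * (100 + 50)
    let buttonRight := buttonLeft + 100
    if buttonLeft ≤ mouseX ∧ mouseX ≤ buttonRight then some i
    else pickButtonLoop mouseX rest

def pickButton (app : Int) (mouseX : Int) (mouseY : Int) : Option Int :=
  if mouseY < 600 ∨ mouseY > 700 then none
  else pickButtonLoop mouseX (PySem.List.pyRange 0 4 1)

-- ===== PORT B =====
def pickButton_alt (app : Int) (mouseX : Int) (mouseY : Int) : Option Int :=
  if mouseY < 600 ∨ mouseY > 700 then none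
  else
    let rel := mouseX - 50
    let i := PySem.Int.floordiv rel 150
    if 0 ≤ rel ∧ i ≤ 3 ∧ PySem.Int.mod rel 150 ≤ 100 then some i
    else none

-- ===== PRECONDITION & SPEC =====
def Spec_pickButton (app : Int) (mouseX : Int) (mouseY : Int) (out : Option Int) : Prop := out = pickButton_alt app mouseX mouseY
instance (app : Int) (mouseX : Int) (mouseY : Int) (out : Option Int) : Decidable (Spec_pickButton app mouseX mouseY out) := by unfold Spec_pickButton; infer_instance

-- ===== CLAIM (what is proved, stated in full; the proofs are below) =====
def Claim_equal_pickButton : Prop := ∀ (app : Int) (mouseX : Int) (mouseY : Int), Dom_pickButton app mouseX mouseY → Spec_pickButton app mouseX mouseY (pickButton app mouseX mouseY)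

-- ===== LEMMAS AND PROOFS =====

-- ===== VERDICT (by name: the statement is the Claim_ definition above) =====
theorem pickButton_spec : Claim_equal_pickButton := by
  intro app mouseX mouseY _
  unfold Spec_pickButton pickButton pickButton_alt
  by_cases hy : mouseY < 600 ∨ mouseY > 700
  · simp [hy]
  · simp only [hy, if_false]
    rw [show PySem.List.pyRange 0 4 1 = [0, 1, 2, 3] from by decide]
    rw [PySem.Int.floordiv_eq_ediv_of_pos (by norm_num),
        PySem.Int.mod_eq_emod_of_pos (by norm_num)]
    simp only [pickButtonLoop]
    split_ifs with h0 h1 h2 h3 hB <;> (try rw [Option.some.injEq]) <;> first | rfl | omega
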